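-- pv_equiv track=rewrite | github.com/NU-YaoLi/st-Quizzly | fntnd/views/_helpers.py | clean_option_text
-- ===== SOURCE A (Python) =====
-- def clean_option_text(s: str) -> str:
--     """Strip up to 3 repeated ``A) `` / ``B) `` / ``C) `` / ``D) `` prefixes.
--
--     Many model outputs already include ``"A) ..."`` inside the option string,
--     so when the UI also renders the letter we end up with ``"A) A) ..."``.
--     Used by the error-notebook and current-quiz-mistakes views.
--     """
--     if not isinstance(s, str):
--         return ""
--     t = s.strip()
--     for _ in range(3):
--         if len(t) >= 3 and t[0].upper() in "ABCD" and t[1] == ")" and t[2] == " ":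
--             t = t[3:].lstrip()
--         else:
--             break
--     return t
-- ===== SOURCE B (Python) =====
-- import re
--
-- # One anchored regex does the whole job declaratively: a "unit" is a letter A-D
-- # (either case), a ')', one literal space, then any run of whitespace; strip the
-- # longest run of 1..3 such units from the front of the stripped string.
-- _PREFIX_RE = re.compile(r'^(?:[A-Da-d]\) \s*){1,3}')
--
--
-- def clean_option_text(s: str) -> str:
--     if not isinstance(s, str):
--         return ""
--     return _PREFIX_RE.sub('', s.strip(), count=1)
-- ===== Notes on version B (the rewrite author's own statement) =====
-- stated objective: idiomatic
-- what changed: Replaces the imperative check-index-then-slice-and-lstrip loop with a single anchored regex substitution (pattern ^(?:[A-Da-d]\) \s*){1,3}, replaced by the empty string, count 1) applied to the stripped string.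
import Mathlib
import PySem

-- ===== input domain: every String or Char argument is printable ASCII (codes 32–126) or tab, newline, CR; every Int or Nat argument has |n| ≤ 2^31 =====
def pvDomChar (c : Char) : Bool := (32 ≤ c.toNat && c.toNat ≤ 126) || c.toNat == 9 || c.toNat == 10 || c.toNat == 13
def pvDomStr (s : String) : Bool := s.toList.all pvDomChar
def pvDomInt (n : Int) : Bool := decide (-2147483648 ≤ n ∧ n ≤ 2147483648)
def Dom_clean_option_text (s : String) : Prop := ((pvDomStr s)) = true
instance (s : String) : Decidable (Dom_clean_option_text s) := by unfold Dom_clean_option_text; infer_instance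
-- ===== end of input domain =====

-- B replaces A's imperative strip-one-prefix-per-iteration loop with one anchored regex
-- substitution, re.sub(r'^(?:[A-Da-d]\) \s*){1,3}', '', t, count=1); same value (not faster).

-- ===== PORT A =====
-- A's loop condition: `len(t) >= 3 and t[0].upper() in "ABCD" and t[1] == ")" and t[2] == " "`.
-- The getD defaults are never used: the length conjunct guards the indexing exactly as
-- Python's short-circuit `and` does.
def condA (t : List Char) : Bool :=
  decide (3 ≤ t.length) && ['A','B','C','D'].contains (PySem.Chars.upperChar (t.getD 0 ' '))
    && (t.getD 1 '?' == ')') && (t.getD 2 '?' == ' ')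

-- `for _ in range(3): if cond: t = t[3:].lstrip() else: break`
def cleanLoopA : Nat → List Char → List Char
  | 0, t => t
  | k + 1, t => if condA t then cleanLoopA k (PySem.Chars.lstrip (t.drop 3)) else t

def clean_option_text (s : String) : String :=
  String.ofList (cleanLoopA 3 (PySem.Chars.strip s.toList))

-- ===== PORT B =====
-- Hand model of the fixed anchored regex `^(?:[A-Da-d]\) \s*){1,3}` applied with
-- re.sub(..., '', t, count=1): exact, because the pattern is anchored and deterministic —
-- each unit starts with a letter while `\s*`'s max-munch stops at a non-whitespace
-- character, so the greedy engine never backtracks and simply takes as many units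
-- (at most 3) as match; removing the matched span leaves exactly the rest.
-- `\s` on ASCII text:
def reSpace (c : Char) : Bool := [' ', '\t', '\n', '\r', Char.ofNat 11, Char.ofNat 12].contains c

-- one unit `[A-Da-d]\) \s*`, returning the rest of the text after it, or none
def reUnit? : List Char → Option (List Char)
  | a :: b :: c :: rest =>
    if "ABCDabcd".toList.contains a && b == ')' && c == ' ' then
      some (rest.dropWhile reSpace)
    else none
  | _ => none

-- greedy `{1,3}` of that unit; result = text left after the matched span (t if no match)
def reSubPrefix (t : List Char) : List Char :=
  match reUnit? t with
  | none => t
  | some r1 =>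
    match reUnit? r1 with
    | none => r1
    | some r2 =>
      match reUnit? r2 with
      | none => r2
      | some r3 => r3

def clean_option_text_alt (s : String) : String :=
  String.ofList (reSubPrefix (PySem.Chars.strip s.toList))

-- ===== PRECONDITION & SPEC =====
def Spec_clean_option_text (s : String) (out : String) : Prop := out = clean_option_text_alt s
instance (s : String) (out : String) : Decidable (Spec_clean_option_text s out) := by unfold Spec_clean_option_text; infer_instance

-- ===== CLAIM (what is proved, stated in full; the proofs are below) =====
def Claim_equal_clean_option_text : Prop := ∀ (s : String), Dom_clean_option_text s → Spec_clean_option_text s (clean_option_text s)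

-- ===== LEMMAS AND PROOFS =====

-- On the domain's chars, `c.upper() in "ABCD"` agrees with the regex class [A-Da-d].
theorem letter_bridge (c : Char) (h : pvDomChar c = true) :
    (['A','B','C','D'].contains (PySem.Chars.upperChar c))
      = ("ABCDabcd".toList.contains c) := by
  have hc : c = Char.ofNat c.toNat := (Char.ofNat_toNat c).symm
  simp only [pvDomChar, Bool.or_eq_true, Bool.and_eq_true, decide_eq_true_eq, beq_iff_eq] at h
  set n := c.toNat with hn
  have h1 : 9 ≤ n := by omega
  have h2 : n ≤ 126 := by omega
  rw [hc]
  interval_cases n <;> decide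

-- On the domain's chars, Python's str-whitespace test agrees with the regex's \s.
theorem ws_bridge (c : Char) (h : pvDomChar c = true) :
    PySem.Chars.isspace c = reSpace c := by
  have hc : c = Char.ofNat c.toNat := (Char.ofNat_toNat c).symm
  simp only [pvDomChar, Bool.or_eq_true, Bool.and_eq_true, decide_eq_true_eq, beq_iff_eq] at h
  set n := c.toNat with hn
  have h1 : 9 ≤ n := by omega
  have h2 : n ≤ 126 := by omega
  rw [hc]
  interval_cases n <;> first | decide | omega

theorem dropWhile_ws_eq (l : List Char) (hdom : ∀ c ∈ l, pvDomChar c = true) :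
    l.dropWhile PySem.Chars.isspace = l.dropWhile reSpace := by
  induction l with
  | nil => rfl
  | cons a l ih =>
    have ha := ws_bridge a (hdom a (List.mem_cons_self ..))
    by_cases h : reSpace a = true
    · simp only [List.dropWhile_cons, ha, h, if_true]
      exact ih (fun c hc => hdom c (List.mem_cons_of_mem _ hc))
    · simp [ha, h]

-- one loop iteration of A agrees with one regex unit of B on domain text
theorem unit_eq (t : List Char) (hdom : ∀ c ∈ t, pvDomChar c = true) :
    reUnit? t = if condA t then some (PySem.Chars.lstrip (t.drop 3)) else none := by
  match t with
  | [] => simp [reUnit?, condA]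
  | [a] => simp [reUnit?, condA]
  | [a, b] => simp [reUnit?, condA]
  | a :: b :: c :: rest =>
    have ha := letter_bridge a (hdom a (by simp))
    have hrest : ∀ x ∈ rest, pvDomChar x = true := fun x hx => hdom x (by simp [hx])
    have hl : PySem.Chars.lstrip ((a :: b :: c :: rest).drop 3)
        = rest.dropWhile reSpace := by
      show rest.dropWhile PySem.Chars.isspace = rest.dropWhile reSpace
      exact dropWhile_ws_eq rest hrest
    have hcond : condA (a :: b :: c :: rest)
        = ("ABCDabcd".toList.contains a && b == ')' && c == ' ') := by
      have hlen : decide (3 ≤ (a :: b :: c :: rest).length) = true := by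
        simp only [List.length_cons, decide_eq_true_eq]
        omega
      simp only [condA, hlen, List.getD_cons_zero, List.getD_cons_succ, ← ha,
        Bool.true_and, Bool.and_assoc]
    rw [hcond, reUnit?]
    by_cases h : ("ABCDabcd".toList.contains a && b == ')' && c == ' ') = true
    · rw [if_pos h, if_pos h, hl]
    · rw [if_neg h, if_neg h]

theorem unit_dom (t r : List Char) (hdom : ∀ c ∈ t, pvDomChar c = true)
    (h : reUnit? t = some r) : ∀ c ∈ r, pvDomChar c = true := by
  rw [unit_eq t hdom] at h
  split_ifs at h with hc
  · rw [Option.some_inj] at h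
    subst h
    intro x hx
    have hx1 : x ∈ (t.drop 3).dropWhile PySem.Chars.isspace := hx
    exact hdom x ((List.drop_sublist 3 t).mem ((List.dropWhile_sublist _).mem hx1))

theorem main_eq (t : List Char) (hdom : ∀ c ∈ t, pvDomChar c = true) :
    cleanLoopA 3 t = reSubPrefix t := by
  have e3 : ∀ u : List Char, cleanLoopA 3 u = if condA u then cleanLoopA 2 (PySem.Chars.lstrip (u.drop 3)) else u := fun _ => rfl
  have e2 : ∀ u : List Char, cleanLoopA 2 u = if condA u then cleanLoopA 1 (PySem.Chars.lstrip (u.drop 3)) else u := fun _ => rfl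
  have e1 : ∀ u : List Char, cleanLoopA 1 u = if condA u then cleanLoopA 0 (PySem.Chars.lstrip (u.drop 3)) else u := fun _ => rfl
  have e0 : ∀ u : List Char, cleanLoopA 0 u = u := fun _ => rfl
  by_cases hc1 : condA t = true
  · have h1 : reUnit? t = some (PySem.Chars.lstrip (t.drop 3)) := by
      rw [unit_eq t hdom, if_pos hc1]
    have hd1 := unit_dom t _ hdom h1
    by_cases hc2 : condA (PySem.Chars.lstrip (t.drop 3)) = true
    · have h2 : reUnit? (PySem.Chars.lstrip (t.drop 3))
          = some (PySem.Chars.lstrip ((PySem.Chars.lstrip (t.drop 3)).drop 3)) := by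
        rw [unit_eq _ hd1, if_pos hc2]
      have hd2 := unit_dom _ _ hd1 h2
      by_cases hc3 : condA (PySem.Chars.lstrip ((PySem.Chars.lstrip (t.drop 3)).drop 3)) = true
      · have h3 : reUnit? (PySem.Chars.lstrip ((PySem.Chars.lstrip (t.drop 3)).drop 3))
            = some (PySem.Chars.lstrip ((PySem.Chars.lstrip ((PySem.Chars.lstrip (t.drop 3)).drop 3)).drop 3)) := by
          rw [unit_eq _ hd2, if_pos hc3]
        simp [reSubPrefix, h1, h2, h3, e3, e2, e1, e0, hc1, hc2, hc3]
      · have h3 : reUnit? (PySem.Chars.lstrip ((PySem.Chars.lstrip (t.drop 3)).drop 3)) = none := by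
          rw [unit_eq _ hd2, if_neg hc3]
        simp [reSubPrefix, h1, h2, h3, e3, e2, e1, hc1, hc2, hc3]
    · have h2 : reUnit? (PySem.Chars.lstrip (t.drop 3)) = none := by
        rw [unit_eq _ hd1, if_neg hc2]
      simp [reSubPrefix, h1, h2, e3, e2, hc1, hc2]
  · have h1 : reUnit? t = none := by rw [unit_eq t hdom, if_neg hc1]
    simp [reSubPrefix, h1, e3, hc1]

theorem strip_dom (s : String) (h : pvDomStr s = true) :
    ∀ c ∈ PySem.Chars.strip s.toList, pvDomChar c = true := by
  intro c hc
  have hmem : c ∈ s.toList := by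
    simp only [PySem.Chars.strip, PySem.Chars.rstrip, PySem.Chars.lstrip, List.mem_reverse] at hc
    have h1 := (List.dropWhile_sublist (l := (List.dropWhile PySem.Chars.isspace s.toList).reverse)
        (p := PySem.Chars.isspace)).mem hc
    rw [List.mem_reverse] at h1
    exact (List.dropWhile_sublist (l := s.toList) (p := PySem.Chars.isspace)).mem h1
  exact List.all_eq_true.mp h c hmem

-- ===== VERDICT (by name: the statement is the Claim_ definition above) =====
theorem clean_option_text_spec : Claim_equal_clean_option_text := by
  intro s hdom
  unfold Spec_clean_option_text clean_option_text clean_option_text_alt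
  rw [main_eq (PySem.Chars.strip s.toList) (strip_dom s hdom)]
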